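-- pv_equiv track=rewrite | github.com/JJong-Min/SWjungle2nd_Study | [Week05~]Additional PS/[프로그래머스] 입실 퇴실.py | solution
-- ===== SOURCE A (Python) =====
-- from collections import defaultdict, deque
--
-- def solution(enter, leave):
--     answer = []
--     person_meet_cnt = defaultdict(int)
--     stack = []
--     queue = deque(leave)
--
--     for _enter in enter:
--         stack.append(_enter)
--         if len(stack) > 1:
--             for _stack in stack[:-1]:
--                 person_meet_cnt[_stack] += 1
--             person_meet_cnt[stack[-1]] += len(stack) - 1
--
--         while queue and queue[0] in stack:
--             stack.remove(queue[0])
--             queue.popleft()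
--
--     answer = [person_meet_cnt[i] for i in range(1, len(enter) + 1)]
--
--     return answer
-- ===== SOURCE B (Python) =====
-- def solution(enter, leave):
--     # Lazy timestamp accounting: each occupant accrues meetings as
--     # (exit iteration - entry iteration); the room is a dict of per-person
--     # FIFO entry-time lists, so there is no scan of the occupants at all.
--     n = len(enter)
--     cnt = {}
--     times = {}  # person -> entry iterations of their present occurrences, oldest first
--     size = 0
--     j = 0
--     for i, e in enumerate(enter, 1):
--         cnt[e] = cnt.get(e, 0) + size
--         times.setdefault(e, []).append(i)
--         size += 1
--         while j < len(leave) and times.get(leave[j]):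
--             x = leave[j]
--             b = times[x].pop(0)
--             cnt[x] = cnt.get(x, 0) + (i - b)
--             size -= 1
--             j += 1
--     for p, bs in times.items():
--         for b in bs:
--             cnt[p] = cnt.get(p, 0) + (n - b)
--     return [cnt.get(v, 0) for v in range(1, n + 1)]
-- ===== Notes on version B (the rewrite author's own statement) =====
-- stated objective: faster
-- what changed: Replaces A's simulation with an explicit occupant stack (per-enter scan incrementing every occupant, plus list remove) by lazy timestamp accounting over a dict of per-person FIFO entry-time lists: each occupant's meetings accrue as (exit iteration - entry iteration), added once at removal or at the end, so no scan over the occupants is ever made.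
import Mathlib
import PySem

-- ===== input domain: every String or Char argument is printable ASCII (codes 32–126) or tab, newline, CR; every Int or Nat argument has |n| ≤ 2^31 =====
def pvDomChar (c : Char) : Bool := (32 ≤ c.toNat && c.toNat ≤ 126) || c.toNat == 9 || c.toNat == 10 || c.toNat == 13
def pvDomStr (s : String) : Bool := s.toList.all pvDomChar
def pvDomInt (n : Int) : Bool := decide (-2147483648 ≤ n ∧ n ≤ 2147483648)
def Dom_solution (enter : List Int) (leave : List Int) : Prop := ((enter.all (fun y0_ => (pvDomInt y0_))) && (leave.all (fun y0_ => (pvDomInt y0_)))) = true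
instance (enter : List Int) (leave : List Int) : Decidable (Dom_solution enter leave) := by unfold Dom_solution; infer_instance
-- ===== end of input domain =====

-- B replaces A's per-enter scan of the occupant stack by lazy timestamp accounting
-- (each occupant accrues exit iteration - entry iteration); objective: faster (measured).


-- ===== PORT A =====
-- 'while queue and queue[0] in stack: stack.remove(queue[0]); queue.popleft()'
-- (membership test + remove-first = remove?: it succeeds exactly when queue[0] ∈ stack)
def pvWhileA : List Int → List Int → List Int × List Int
  | stack, [] => (stack, [])
  | stack, q :: qs =>
    match PySem.List.remove? stack q with
    | some s => pvWhileA s qs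
    | none => (stack, q :: qs)

-- one iteration of 'for _enter in enter'; state = (person_meet_cnt, stack, queue)
def pvStepA (st : PySem.Dict Int Int × List Int × List Int) (e : Int) :
    PySem.Dict Int Int × List Int × List Int :=
  let stack1 := st.2.1 ++ [e]
  let cnt1 :=
    if 1 < stack1.length then
      let c := stack1.dropLast.foldl (fun d x => d.insert x (d.getD x 0 + 1)) st.1
      c.insert e (c.getD e 0 + ((stack1.length : Int) - 1))
    else st.1
  let r := pvWhileA stack1 st.2.2
  (cnt1, r.1, r.2)

def solution (enter : List Int) (leave : List Int) : List Int :=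
  let st := enter.foldl pvStepA ((PySem.Dict.empty : PySem.Dict Int Int), ([] : List Int), leave)
  (PySem.List.pyRange 1 ((enter.length : Int) + 1) 1).map (fun i => st.1.getD i 0)

-- ===== PORT B =====
-- 'times.setdefault(e, []).append(i)' / 'times[x].pop(0)' : Dict.modify appends,
-- insert of the tail pops in place; 'times.get(leave[j])' truthy = list nonempty
def pvWhileB2 : PySem.Dict Int Int → PySem.Dict Int (List Int) → Int → List Int → Int →
    PySem.Dict Int Int × PySem.Dict Int (List Int) × Int × List Int
  | cnt, times, size, [], _ => (cnt, times, size, [])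
  | cnt, times, size, q :: qs, i =>
    match times.getD q [] with
    | [] => (cnt, times, size, q :: qs)
    | b :: bs =>
      pvWhileB2 (cnt.insert q (cnt.getD q 0 + (i - b))) (times.insert q bs) (size - 1) qs i

-- one iteration of 'for i, e in enumerate(enter, 1)'; state = (cnt, times, size, unconsumed leave, i)
def pvStepB2 (st : PySem.Dict Int Int × PySem.Dict Int (List Int) × Int × List Int × Int) (e : Int) :
    PySem.Dict Int Int × PySem.Dict Int (List Int) × Int × List Int × Int :=
  let i1 := st.2.2.2.2 + 1
  let cnt1 := st.1.insert e (st.1.getD e 0 + st.2.2.1)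
  let times1 := st.2.1.modify e [] (· ++ [i1])
  let r := pvWhileB2 cnt1 times1 (st.2.2.1 + 1) st.2.2.2.1 i1
  (r.1, r.2.1, r.2.2.1, r.2.2.2, i1)

def solution_alt (enter : List Int) (leave : List Int) : List Int :=
  let n : Int := (enter.length : Int)
  let st := enter.foldl pvStepB2
    ((PySem.Dict.empty : PySem.Dict Int Int), (PySem.Dict.empty : PySem.Dict Int (List Int)), 0, leave, 0)
  let cntF := st.2.1.items.foldl
    (fun c pbs => pbs.2.foldl (fun c b => c.insert pbs.1 (c.getD pbs.1 0 + (n - b))) c) st.1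
  (PySem.List.pyRange 1 (n + 1) 1).map (fun v => cntF.getD v 0)

-- ===== PRECONDITION & SPEC =====
def Spec_solution (enter : List Int) (leave : List Int) (out : List Int) : Prop := out = solution_alt enter leave
instance (enter : List Int) (leave : List Int) (out : List Int) : Decidable (Spec_solution enter leave out) := by unfold Spec_solution; infer_instance

-- ===== CLAIM (what is proved, stated in full; the proofs are below) =====
def Claim_equal_solution : Prop := ∀ (enter : List Int) (leave : List Int), Dom_solution enter leave → Spec_solution enter leave (solution enter leave)

-- ===== LEMMAS AND PROOFS =====

-- proof-layer intermediate implementation: B with the room as an explicit (person, entry) list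
def pvFindRemove : List (Int × Int) → Int → Option ((Int × Int) × List (Int × Int))
  | [], _ => none
  | (p, b) :: rest, x =>
    if p == x then some ((p, b), rest)
    else
      match pvFindRemove rest x with
      | some (pb, rest') => some (pb, (p, b) :: rest')
      | none => none

-- B's while loop (Python tracks the unconsumed suffix of 'leave' by index j; ported as the suffix)
def pvWhileB : PySem.Dict Int Int → List (Int × Int) → List Int → Int →
    PySem.Dict Int Int × List (Int × Int) × List Int
  | cnt, room, [], _ => (cnt, room, [])
  | cnt, room, q :: qs, i =>
    match pvFindRemove room q with
    | some (pb, room') => pvWhileB (cnt.insert q (cnt.getD q 0 + (i - pb.2))) room' qs i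
    | none => (cnt, room, q :: qs)

-- one iteration of 'for i, e in enumerate(enter, 1)'; state = (cnt, room, unconsumed leave, i)
def pvStepB (st : PySem.Dict Int Int × List (Int × Int) × List Int × Int) (e : Int) :
    PySem.Dict Int Int × List (Int × Int) × List Int × Int :=
  let i1 := st.2.2.2 + 1
  let cnt1 := st.1.insert e (st.1.getD e 0 + (st.2.1.length : Int))
  let room1 := st.2.1 ++ [(e, i1)]
  let r := pvWhileB cnt1 room1 st.2.2.1 i1
  (r.1, r.2.1, r.2.2, i1)


-- pending meet-count of the current room at iteration i, credited to person v
def pvSum (room : List (Int × Int)) (i v : Int) : Int :=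
  (room.map (fun pb => if pb.1 = v then i - pb.2 else 0)).sum

theorem pvSum_nil (i v : Int) : pvSum [] i v = 0 := rfl

theorem pvSum_append_self (room : List (Int × Int)) (i v e : Int) :
    pvSum (room ++ [(e, i)]) i v = pvSum room i v := by
  simp [pvSum]

theorem pvSum_succ (room : List (Int × Int)) (i v : Int) :
    pvSum room (i + 1) v = pvSum room i v + ((room.map Prod.fst).count v : Int) := by
  induction room with
  | nil => simp [pvSum]
  | cons pb rest ih =>
    simp only [pvSum, List.map_cons, List.sum_cons, List.count_cons] at *
    by_cases h : pb.1 = v <;> simp [h, ih] <;> push_cast <;> ring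

theorem pvSum_cons (p b : Int) (rest : List (Int × Int)) (i v : Int) :
    pvSum ((p, b) :: rest) i v = (if p = v then i - b else 0) + pvSum rest i v := by
  simp [pvSum]

theorem findRemove_none {room : List (Int × Int)} {q : Int}
    (h : pvFindRemove room q = none) : q ∉ room.map Prod.fst := by
  induction room with
  | nil => simp
  | cons pb rest ih =>
    obtain ⟨p, b⟩ := pb
    by_cases hpq : p = q
    · simp [pvFindRemove, hpq] at h
    · simp only [pvFindRemove, beq_iff_eq, hpq, if_false] at h
      rcases h' : pvFindRemove rest q with _ | ⟨pb', rest'⟩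
      · intro hmem
        simp only [List.map_cons, List.mem_cons] at hmem
        rcases hmem with h1 | h2
        · exact hpq h1.symm
        · exact ih h' h2
      · simp [h'] at h

theorem findRemove_some {room : List (Int × Int)} {q : Int} {pb : Int × Int}
    {room' : List (Int × Int)} (h : pvFindRemove room q = some (pb, room')) :
    pb.1 = q ∧ PySem.List.remove? (room.map Prod.fst) q = some (room'.map Prod.fst) ∧
      ∀ i v, pvSum room i v = pvSum room' i v + (if v = q then i - pb.2 else 0) := by
  induction room generalizing room' with
  | nil => simp [pvFindRemove] at h
  | cons hd rest ih =>
    obtain ⟨p, b⟩ := hd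
    by_cases hpq : p = q
    · subst hpq
      simp only [pvFindRemove, beq_self_eq_true, if_true, Option.some.injEq, Prod.mk.injEq] at h
      obtain ⟨h1, h2⟩ := h
      subst h1; subst h2
      refine ⟨rfl, by simp [PySem.List.remove?_cons_self], ?_⟩
      intro i v
      rw [pvSum_cons]
      by_cases hv : v = p
      · subst hv; simp; ring
      · have hpv : p ≠ v := fun hh => hv hh.symm
        simp [hpv, hv]
    · simp only [pvFindRemove, beq_iff_eq, hpq, if_false] at h
      rcases h' : pvFindRemove rest q with _ | ⟨pb', rest''⟩
      · simp [h'] at h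
      · rw [h'] at h
        simp only [Option.some.injEq, Prod.mk.injEq] at h
        obtain ⟨h1, h2⟩ := h
        obtain ⟨hq, hrem, hsum⟩ := ih (by rw [h', h1])
        subst h2
        refine ⟨hq, ?_, ?_⟩
        · simp only [List.map_cons]
          rw [PySem.List.remove?_cons_of_ne _ hpq, hrem]
          rfl
        · intro i v
          rw [pvSum_cons, pvSum_cons, hsum i v]
          ring

theorem while_corr (ql : List Int) : ∀ (cntB : PySem.Dict Int Int)
    (room : List (Int × Int)) (i : Int),
    ((pvWhileB cntB room ql i).2.1.map Prod.fst, (pvWhileB cntB room ql i).2.2)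
      = pvWhileA (room.map Prod.fst) ql
    ∧ ∀ v, (pvWhileB cntB room ql i).1.getD v 0 + pvSum (pvWhileB cntB room ql i).2.1 i v
      = cntB.getD v 0 + pvSum room i v := by
  induction ql with
  | nil => intro cntB room i; simp [pvWhileA, pvWhileB]
  | cons q qs ih =>
    intro cntB room i
    rcases h : pvFindRemove room q with _ | ⟨pb, room'⟩
    · have hnm := findRemove_none h
      have : PySem.List.remove? (room.map Prod.fst) q = none :=
        (PySem.List.remove?_eq_none_iff _ _).mpr hnm
      simp [pvWhileA, pvWhileB, h, this]
    · obtain ⟨hq, hrem, hsum⟩ := findRemove_some h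
      have hA : pvWhileA (room.map Prod.fst) (q :: qs) = pvWhileA (room'.map Prod.fst) qs := by
        simp [pvWhileA, hrem]
      have hB : pvWhileB cntB room (q :: qs) i
          = pvWhileB (cntB.insert q (cntB.getD q 0 + (i - pb.2))) room' qs i := by
        simp [pvWhileB, h]
      obtain ⟨ih1, ih2⟩ := ih (cntB.insert q (cntB.getD q 0 + (i - pb.2))) room' i
      rw [hA, hB]
      refine ⟨ih1, ?_⟩
      intro v
      rw [ih2 v, hsum i v, PySem.Dict.getD_insert]
      by_cases hv : v = q <;> simp [hv] <;> ring

theorem fold_corr (rest : List Int) : ∀ (cntA cntB : PySem.Dict Int Int)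
    (room : List (Int × Int)) (ql : List Int) (i : Int),
    (∀ v, cntA.getD v 0 = cntB.getD v 0 + pvSum room i v) →
    (rest.foldl pvStepA (cntA, room.map Prod.fst, ql)).2.1
        = (rest.foldl pvStepB (cntB, room, ql, i)).2.1.map Prod.fst
    ∧ (rest.foldl pvStepA (cntA, room.map Prod.fst, ql)).2.2
        = (rest.foldl pvStepB (cntB, room, ql, i)).2.2.1
    ∧ (rest.foldl pvStepB (cntB, room, ql, i)).2.2.2 = i + rest.length
    ∧ ∀ v, (rest.foldl pvStepA (cntA, room.map Prod.fst, ql)).1.getD v 0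
        = (rest.foldl pvStepB (cntB, room, ql, i)).1.getD v 0
          + pvSum (rest.foldl pvStepB (cntB, room, ql, i)).2.1
              (rest.foldl pvStepB (cntB, room, ql, i)).2.2.2 v := by
  induction rest with
  | nil =>
    intro cntA cntB room ql i hrel
    exact ⟨rfl, rfl, by simp, hrel⟩
  | cons e rest ih =>
    intro cntA cntB room ql i hrel
    -- one step of each fold
    have hdrop : (room.map Prod.fst ++ [e]).dropLast = room.map Prod.fst := by
      simp
    set cnt1A :=
      (if 1 < (room.map Prod.fst ++ [e]).length then
        let c := (room.map Prod.fst ++ [e]).dropLast.foldl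
            (fun d x => d.insert x (d.getD x 0 + 1)) cntA
        c.insert e (c.getD e 0 + (((room.map Prod.fst ++ [e]).length : Int) - 1))
      else cntA) with hcnt1A
    set cnt1B := cntB.insert e (cntB.getD e 0 + (room.length : Int)) with hcnt1B
    have hrel1 : ∀ v, cnt1A.getD v 0 = cnt1B.getD v 0 + pvSum (room ++ [(e, i + 1)]) (i + 1) v := by
      intro v
      have hsumapp : pvSum (room ++ [(e, i + 1)]) (i + 1) v = pvSum room i v
          + ((room.map Prod.fst).count v : Int) := by
        rw [pvSum_append_self, pvSum_succ]
      rcases room with _ | ⟨hd, tl⟩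
      · simp only [hcnt1A, hcnt1B]
        simp [pvSum, PySem.Dict.getD_insert]
        by_cases hv : v = e <;> simp [hv, hrel v, pvSum_nil] <;>
          simpa [pvSum_nil] using hrel e
      · have hlen : 1 < ((hd :: tl).map Prod.fst ++ [e]).length := by simp
        rw [hcnt1A]
        simp only [hlen, if_true, hdrop]
        rw [PySem.Dict.getD_insert]
        rw [hsumapp, hcnt1B, PySem.Dict.getD_insert]
        by_cases hv : v = e
        · subst hv
          rw [PySem.Dict.getD_foldl_insert_add_one, hrel v]
          simp
          push_cast
          ring
        · simp only [hv, if_false]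
          rw [PySem.Dict.getD_foldl_insert_add_one, hrel v]
          ring
    obtain ⟨w1, w2⟩ := while_corr ql cnt1B (room ++ [(e, i + 1)]) (i + 1)
    have hstepA : pvStepA (cntA, room.map Prod.fst, ql) e
        = (cnt1A, (pvWhileA (room.map Prod.fst ++ [e]) ql).1,
            (pvWhileA (room.map Prod.fst ++ [e]) ql).2) := by
      simp [pvStepA, hcnt1A]
    have hstepB : pvStepB (cntB, room, ql, i) e
        = ((pvWhileB cnt1B (room ++ [(e, i + 1)]) ql (i + 1)).1,
           (pvWhileB cnt1B (room ++ [(e, i + 1)]) ql (i + 1)).2.1,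
           (pvWhileB cnt1B (room ++ [(e, i + 1)]) ql (i + 1)).2.2, i + 1) := by
      simp [pvStepB, hcnt1B]
    have hmapapp : room.map Prod.fst ++ [e] = (room ++ [(e, i + 1)]).map Prod.fst := by simp
    have hrel2 : ∀ v,
        cnt1A.getD v 0 = (pvWhileB cnt1B (room ++ [(e, i + 1)]) ql (i + 1)).1.getD v 0
          + pvSum (pvWhileB cnt1B (room ++ [(e, i + 1)]) ql (i + 1)).2.1 (i + 1) v := by
      intro v; rw [hrel1 v, ← w2 v]
    have hqA : pvWhileA (room.map Prod.fst ++ [e]) ql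
        = ((pvWhileB cnt1B (room ++ [(e, i + 1)]) ql (i + 1)).2.1.map Prod.fst,
           (pvWhileB cnt1B (room ++ [(e, i + 1)]) ql (i + 1)).2.2) := by
      rw [hmapapp, ← w1]
    simp only [List.foldl_cons, hstepA, hstepB, hqA]
    obtain ⟨o1, o2, o3, o4⟩ := ih cnt1A
      (pvWhileB cnt1B (room ++ [(e, i + 1)]) ql (i + 1)).1
      (pvWhileB cnt1B (room ++ [(e, i + 1)]) ql (i + 1)).2.1
      (pvWhileB cnt1B (room ++ [(e, i + 1)]) ql (i + 1)).2.2
      (i + 1) hrel2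
    refine ⟨o1, o2, ?_, o4⟩
    rw [o3]
    push_cast [List.length_cons]
    ring

-- ===== B1 ≡ B2: the (person, entry) list simulated by the FIFO dict =====

def pvRel2 (room : List (Int × Int)) (times : PySem.Dict Int (List Int)) (size : Int) : Prop :=
  size = (room.length : Int) ∧ times.keys.Nodup ∧
    ∀ v, times.getD v [] = (room.filter (fun pb => pb.1 == v)).map Prod.snd

theorem pvSum_filter (room : List (Int × Int)) (n v : Int) :
    pvSum room n v = ((room.filter (fun pb => pb.1 == v)).map (fun pb => n - pb.2)).sum := by
  induction room with
  | nil => simp [pvSum]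
  | cons pb rest ih =>
    obtain ⟨p, b⟩ := pb
    rw [pvSum_cons, ih]
    by_cases h : p = v <;> simp [h]

theorem findRemove_filter {room : List (Int × Int)} {q : Int} {pb : Int × Int}
    {room' : List (Int × Int)} (h : pvFindRemove room q = some (pb, room')) :
    room.filter (fun x => x.1 == q) = pb :: room'.filter (fun x => x.1 == q)
    ∧ (∀ w, w ≠ q → room.filter (fun x => x.1 == w) = room'.filter (fun x => x.1 == w))
    ∧ room.length = room'.length + 1 := by
  induction room generalizing room' with
  | nil => simp [pvFindRemove] at h
  | cons hd rest ih =>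
    obtain ⟨p, b⟩ := hd
    by_cases hpq : p = q
    · subst hpq
      simp only [pvFindRemove, beq_self_eq_true, if_true, Option.some.injEq, Prod.mk.injEq] at h
      obtain ⟨h1, h2⟩ := h
      subst h1; subst h2
      refine ⟨by simp, ?_, by simp⟩
      intro w hw
      have : ¬(p = w) := fun hh => hw (hh ▸ rfl)
      simp [this]
    · simp only [pvFindRemove, beq_iff_eq, hpq, if_false] at h
      rcases h' : pvFindRemove rest q with _ | ⟨pb', rest''⟩
      · simp [h'] at h
      · rw [h'] at h
        simp only [Option.some.injEq, Prod.mk.injEq] at h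
        obtain ⟨h1, h2⟩ := h
        obtain ⟨g1, g2, g3⟩ := ih (by rw [h', h1])
        subst h2
        refine ⟨?_, ?_, by simp [g3]⟩
        · simp only [List.filter_cons, beq_iff_eq, hpq, decide_eq_true_eq, if_neg hpq, g1]
          simp [hpq]
        · intro w hw
          by_cases hpw : p = w <;> simp [List.filter_cons, hpw, g2 w hw]

theorem filter_none_of_findRemove_none {room : List (Int × Int)} {q : Int}
    (h : pvFindRemove room q = none) : room.filter (fun pb => pb.1 == q) = [] := by
  have hnm := findRemove_none h
  refine List.filter_eq_nil_iff.mpr ?_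
  intro pb hmem
  simp only [beq_iff_eq, decide_eq_true_eq]
  intro hpq
  exact hnm (List.mem_map.mpr ⟨pb, hmem, hpq⟩)

theorem while2_corr (ql : List Int) : ∀ (cnt : PySem.Dict Int Int) (room : List (Int × Int))
    (times : PySem.Dict Int (List Int)) (size : Int) (i : Int),
    pvRel2 room times size →
    (pvWhileB2 cnt times size ql i).1 = (pvWhileB cnt room ql i).1
    ∧ (pvWhileB2 cnt times size ql i).2.2.2 = (pvWhileB cnt room ql i).2.2
    ∧ pvRel2 (pvWhileB cnt room ql i).2.1 (pvWhileB2 cnt times size ql i).2.1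
        (pvWhileB2 cnt times size ql i).2.2.1 := by
  induction ql with
  | nil =>
    intro cnt room times size i hrel
    exact ⟨rfl, rfl, hrel⟩
  | cons q qs ih =>
    intro cnt room times size i hrel
    obtain ⟨hsz, hnd, hget⟩ := hrel
    rcases h : pvFindRemove room q with _ | ⟨pb, room'⟩
    · have hfil := filter_none_of_findRemove_none h
      have hq : times.getD q [] = [] := by rw [hget q, hfil]; rfl
      have h2 : pvWhileB2 cnt times size (q :: qs) i = (cnt, times, size, q :: qs) := by
        simp [pvWhileB2, hq]
      have h1 : pvWhileB cnt room (q :: qs) i = (cnt, room, q :: qs) := by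
        simp [pvWhileB, h]
      rw [h1, h2]
      exact ⟨rfl, rfl, hsz, hnd, hget⟩
    · obtain ⟨hf1, hf2, hlen⟩ := findRemove_filter h
      have hq : times.getD q [] = pb.2 :: (room'.filter (fun x => x.1 == q)).map Prod.snd := by
        rw [hget q, hf1]; rfl
      have h2 : pvWhileB2 cnt times size (q :: qs) i
          = pvWhileB2 (cnt.insert q (cnt.getD q 0 + (i - pb.2)))
              (times.insert q ((room'.filter (fun x => x.1 == q)).map Prod.snd))
              (size - 1) qs i := by
        simp [pvWhileB2, hq]
      have h1 : pvWhileB cnt room (q :: qs) i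
          = pvWhileB (cnt.insert q (cnt.getD q 0 + (i - pb.2))) room' qs i := by
        simp [pvWhileB, h]
      rw [h1, h2]
      refine ih _ room' _ _ i ⟨?_, PySem.Dict.nodup_keys_insert _ _ _ hnd, ?_⟩
      · rw [hsz, hlen]; push_cast; ring
      · intro v
        rw [PySem.Dict.getD_insert]
        by_cases hv : v = q
        · subst hv; simp
        · rw [if_neg hv, hget v, hf2 v hv]

theorem fold2_corr (rest : List Int) : ∀ (cnt : PySem.Dict Int Int) (room : List (Int × Int))
    (times : PySem.Dict Int (List Int)) (size : Int) (ql : List Int) (i : Int),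
    pvRel2 room times size →
    (rest.foldl pvStepB2 (cnt, times, size, ql, i)).1
        = (rest.foldl pvStepB (cnt, room, ql, i)).1
    ∧ pvRel2 (rest.foldl pvStepB (cnt, room, ql, i)).2.1
        (rest.foldl pvStepB2 (cnt, times, size, ql, i)).2.1
        (rest.foldl pvStepB2 (cnt, times, size, ql, i)).2.2.1 := by
  induction rest with
  | nil =>
    intro cnt room times size ql i hrel
    exact ⟨rfl, hrel⟩
  | cons e rest ih =>
    intro cnt room times size ql i hrel
    obtain ⟨hsz, hnd, hget⟩ := hrel
    subst hsz
    have hsz1 : (room.length : Int) + 1 = (((room ++ [(e, i + 1)]).length : Nat) : Int) := by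
      simp
    have hrel1 : pvRel2 (room ++ [(e, i + 1)]) (times.modify e [] (· ++ [i + 1])) ((room.length : Int) + 1) := by
      refine ⟨hsz1, ?_, ?_⟩
      · have hk := PySem.Dict.keys_modify times e ([] : List Int) (· ++ [i + 1])
        have := PySem.Dict.nodup_keys_insert times e (times.getD e [] ++ [i + 1]) hnd
        rw [hk]; exact this
      · intro v
        rw [PySem.Dict.getD_modify]
        by_cases hv : v = e
        · subst hv
          rw [if_pos rfl, hget v]
          simp [List.filter_append]
        · rw [if_neg hv, hget v]
          have : ¬(e = v) := fun hh => hv hh.symm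
          simp [List.filter_append, this]
    have hstep1 : pvStepB (cnt, room, ql, i) e
        = ((pvWhileB (cnt.insert e (cnt.getD e 0 + (room.length : Int))) (room ++ [(e, i + 1)]) ql (i + 1)).1,
           (pvWhileB (cnt.insert e (cnt.getD e 0 + (room.length : Int))) (room ++ [(e, i + 1)]) ql (i + 1)).2.1,
           (pvWhileB (cnt.insert e (cnt.getD e 0 + (room.length : Int))) (room ++ [(e, i + 1)]) ql (i + 1)).2.2, i + 1) := by
      simp [pvStepB]
    have hstep2 : pvStepB2 (cnt, times, (room.length : Int), ql, i) e
        = ((pvWhileB2 (cnt.insert e (cnt.getD e 0 + (room.length : Int))) (times.modify e [] (· ++ [i + 1])) ((room.length : Int) + 1) ql (i + 1)).1,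
           (pvWhileB2 (cnt.insert e (cnt.getD e 0 + (room.length : Int))) (times.modify e [] (· ++ [i + 1])) ((room.length : Int) + 1) ql (i + 1)).2.1,
           (pvWhileB2 (cnt.insert e (cnt.getD e 0 + (room.length : Int))) (times.modify e [] (· ++ [i + 1])) ((room.length : Int) + 1) ql (i + 1)).2.2.1,
           (pvWhileB2 (cnt.insert e (cnt.getD e 0 + (room.length : Int))) (times.modify e [] (· ++ [i + 1])) ((room.length : Int) + 1) ql (i + 1)).2.2.2, i + 1) := by
      simp [pvStepB2]
    obtain ⟨w1, w2, w3⟩ := while2_corr ql (cnt.insert e (cnt.getD e 0 + (room.length : Int)))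
      (room ++ [(e, i + 1)]) (times.modify e [] (· ++ [i + 1])) ((room.length : Int) + 1) (i + 1) hrel1
    simp only [List.foldl_cons, hstep1, hstep2, w1, w2]
    exact ih _ _ _ _ _ _ w3

theorem inner_fold_getD (bs : List Int) : ∀ (c : PySem.Dict Int Int) (p n v : Int),
    (bs.foldl (fun c b => c.insert p (c.getD p 0 + (n - b))) c).getD v 0
      = c.getD v 0 + (if p = v then (bs.map (fun b => n - b)).sum else 0) := by
  induction bs with
  | nil => intro c p n v; simp
  | cons b bs ih =>
    intro c p n v
    rw [List.foldl_cons, ih, PySem.Dict.getD_insert]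
    by_cases h : p = v
    · subst h; simp; ring
    · have : ¬(v = p) := fun hh => h hh.symm
      simp [h, this]

theorem items_fold_getD (l : List (Int × List Int)) : ∀ (c : PySem.Dict Int Int) (n v : Int),
    (l.foldl (fun c pbs => pbs.2.foldl (fun c b => c.insert pbs.1 (c.getD pbs.1 0 + (n - b))) c) c).getD v 0
      = c.getD v 0
        + (((l.filter (fun pbs => pbs.1 == v)).flatMap (fun pbs => pbs.2)).map (fun b => n - b)).sum := by
  induction l with
  | nil => intro c n v; simp
  | cons pbs l ih =>
    intro c n v
    rw [List.foldl_cons, ih, inner_fold_getD]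
    by_cases h : pbs.1 = v
    · simp [List.filter_cons, h]; ring
    · have hvp : ¬(v = pbs.1) := fun hh => h hh.symm
      simp [List.filter_cons, h, hvp]

theorem flatMap_filter_aux (l : List (Int × List Int)) (v : Int)
    (hn : (l.map Prod.fst).Nodup) :
    (l.filter (fun pbs => pbs.1 == v)).flatMap (fun pbs => pbs.2)
      = (PySem.Dict.mk l).getD v [] := by
  induction l with
  | nil => simp [PySem.Dict.getD_eq_get?_getD]; rfl
  | cons pbs l ih =>
    obtain ⟨p, bs⟩ := pbs
    simp only [List.map_cons, List.nodup_cons] at hn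
    obtain ⟨hp, hn'⟩ := hn
    rw [PySem.Dict.getD_eq_get?_getD, PySem.Dict.get?_mk_cons]
    by_cases h : p = v
    · subst h
      rw [if_pos (by simp)]
      have hfil : l.filter (fun pbs => pbs.1 == p) = [] := by
        refine List.filter_eq_nil_iff.mpr ?_
        intro x hx
        simp only [beq_iff_eq, decide_eq_true_eq]
        intro hxp
        exact hp (List.mem_map.mpr ⟨x, hx, hxp⟩)
      simp [List.filter_cons, hfil]
    · rw [if_neg (by simpa using h)]
      rw [← PySem.Dict.getD_eq_get?_getD, ← ih hn']
      simp [List.filter_cons, h]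

theorem flatMap_filter_eq_getD (d : PySem.Dict Int (List Int)) (v : Int)
    (hn : d.keys.Nodup) :
    (d.items.filter (fun pbs => pbs.1 == v)).flatMap (fun pbs => pbs.2) = d.getD v [] := by
  obtain ⟨l⟩ := d
  exact flatMap_filter_aux l v hn

theorem solution_spec : Claim_equal_solution := by
  intro enter leave _
  unfold Spec_solution solution solution_alt
  obtain ⟨_, _, h3, h4⟩ := fold_corr enter PySem.Dict.empty PySem.Dict.empty [] leave 0
    (by intro v; simp [pvSum])
  simp only [List.map_nil] at h3 h4
  simp only [zero_add] at h3
  obtain ⟨g1, g2⟩ := fold2_corr enter PySem.Dict.empty [] PySem.Dict.empty 0 leave 0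
    ⟨by simp, PySem.Dict.nodup_keys_empty, by intro v; simp [PySem.Dict.getD_empty]⟩
  obtain ⟨gsz, gnd, gget⟩ := g2
  simp only []
  apply List.map_congr_left
  intro x _
  rw [h4 x, h3, items_fold_getD, g1]
  congr 1
  rw [flatMap_filter_eq_getD _ x gnd, gget x, pvSum_filter, List.map_map]
  rfl
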